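-- pv_equiv track=rewrite | github.com/PATX0/Proj2IA1718 | BN.py | possEvid
-- ===== SOURCE A (Python) =====
-- def possEvid(lstEv, ev): #retorna lista de evs possiveis
-- 	lstPoss = []
-- 	newEv = [];	newEv1 = []; newEv2 = []; newEv3 = []
-- 	newEv4 = []; newEv5 = []; newEv6 = []; newEv7 = []
-- 	for i in range(0, len(ev)): #create list with evs to manipulate
-- 		if ev[i] == -1:
-- 			newEv.append(1); newEv1.append(1)
-- 			newEv2.append(1); newEv3.append(1)
-- 			newEv4.append(0); newEv5.append(0)
-- 			newEv6.append(0); newEv7.append(0)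
-- 		else:
-- 			newEv.append(ev[i]); newEv1.append(ev[i])
-- 			newEv2.append(ev[i]); newEv3.append(ev[i])
-- 			newEv4.append(ev[i]); newEv5.append(ev[i])
-- 			newEv6.append(ev[i]); newEv7.append(ev[i])
--
-- 	#g = 0; h = 1; i = 0; j = 1; k = 0; l = 1
-- 	a = 0; b = 1; c = 0; d = 1; e = 0; f = 1
--
-- 	for idx in lstEv:
-- 		newEv[idx] = a; newEv4[idx] = a
-- 		newEv1[idx] = b; newEv5[idx] = b
-- 		newEv2[idx] = c; newEv6[idx] = c
-- 		newEv3[idx] = f; newEv7[idx] = f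
-- 		c = d; f = e
--
-- 	if len(lstEv)==1:
-- 		lstPoss.append(tuple(newEv)); lstPoss.append(tuple(newEv1))
-- 		lstPoss.append(tuple(newEv4)); lstPoss.append(tuple(newEv5))
-- 		return lstPoss
--
-- 	if len(lstEv) == 2:
-- 		lstPoss.append(tuple(newEv)); lstPoss.append(tuple(newEv1))
-- 		lstPoss.append(tuple(newEv2)); lstPoss.append(tuple(newEv3))
-- 		lstPoss.append(tuple(newEv4)); lstPoss.append(tuple(newEv5))
-- 		lstPoss.append(tuple(newEv6)); lstPoss.append(tuple(newEv7))
-- 		return lstPoss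
-- ===== SOURCE B (Python) =====
-- def possEvid(lstEv, ev):
--     base1 = [1 if x == -1 else x for x in ev]
--     base0 = [0 if x == -1 else x for x in ev]
--     if len(lstEv) == 1:
--         combos = [(0,), (1,)]
--     elif len(lstEv) == 2:
--         combos = [(0, 0), (1, 1), (0, 1), (1, 0)]
--     else:
--         return None
--     res = []
--     for base in (base1, base0):
--         for combo in combos:
--             cur = list(base)
--             for j in range(len(lstEv)):
--                 cur[lstEv[j]] = combo[j]
--             res.append(tuple(cur))
--     return res
-- ===== Notes on version B (the rewrite author's own statement) =====
-- stated objective: simpler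
-- what changed: B replaces A's eight parallel hand-maintained lists and mutating c/f state machine by two base vectors plus an explicit combo table, producing the result with two nested loops (base x combo) that set positions from the table; A appends to 8 lists per element, B builds 2.
-- outside the precondition, e.g. on possEvid([], [1]): A returns None, B returns None; on possEvid([0, 1, 2], [0, 0, 0]): A returns None, B returns None
import Mathlib
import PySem

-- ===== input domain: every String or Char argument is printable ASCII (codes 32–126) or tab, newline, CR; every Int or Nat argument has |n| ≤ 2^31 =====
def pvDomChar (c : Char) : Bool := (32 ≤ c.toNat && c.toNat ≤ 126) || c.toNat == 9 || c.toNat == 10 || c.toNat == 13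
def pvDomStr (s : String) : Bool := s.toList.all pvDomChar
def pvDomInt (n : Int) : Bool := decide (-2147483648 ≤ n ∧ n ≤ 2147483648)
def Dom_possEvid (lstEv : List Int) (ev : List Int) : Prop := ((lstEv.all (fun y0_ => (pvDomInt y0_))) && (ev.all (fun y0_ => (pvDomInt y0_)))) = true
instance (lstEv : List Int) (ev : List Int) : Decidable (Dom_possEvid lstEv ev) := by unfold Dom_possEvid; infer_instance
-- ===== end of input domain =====

-- B replaces A's eight parallel lists and c/f state machine by two base vectors and an explicit
-- combo table iterated with two nested loops; same cost, simpler decomposition.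
-- Pre_ excludes len(lstEv) ∉ {1,2} (A returns None, not a list) and out-of-range indices (A raises IndexError).

-- ===== PORT A =====
-- the eight parallel lists newEv..newEv7 plus the mutating c, f of A's loop
structure PvASt where
  n0 : List Int
  n1 : List Int
  n2 : List Int
  n3 : List Int
  n4 : List Int
  n5 : List Int
  n6 : List Int
  n7 : List Int
  c : Int
  f : Int
deriving Repr, DecidableEq

-- body of A's first loop (append ev[i] or the 1/0 substitutes to all eight lists)
def pvBuildStep (s : PvASt) (x : Int) : PvASt :=
  if x = -1 then
    { s with n0 := s.n0 ++ [1], n1 := s.n1 ++ [1], n2 := s.n2 ++ [1], n3 := s.n3 ++ [1],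
             n4 := s.n4 ++ [0], n5 := s.n5 ++ [0], n6 := s.n6 ++ [0], n7 := s.n7 ++ [0] }
  else
    { s with n0 := s.n0 ++ [x], n1 := s.n1 ++ [x], n2 := s.n2 ++ [x], n3 := s.n3 ++ [x],
             n4 := s.n4 ++ [x], n5 := s.n5 ++ [x], n6 := s.n6 ++ [x], n7 := s.n7 ++ [x] }

-- body of A's second loop: a=0, b=1, d=1, e=0 are constants; after each step c = d, f = e
def pvAssignStep (s : PvASt) (idx : Int) : PvASt :=
  { n0 := PySem.List.pySetD s.n0 idx 0, n4 := PySem.List.pySetD s.n4 idx 0,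
    n1 := PySem.List.pySetD s.n1 idx 1, n5 := PySem.List.pySetD s.n5 idx 1,
    n2 := PySem.List.pySetD s.n2 idx s.c, n6 := PySem.List.pySetD s.n6 idx s.c,
    n3 := PySem.List.pySetD s.n3 idx s.f, n7 := PySem.List.pySetD s.n7 idx s.f,
    c := 1, f := 0 }

def possEvid (lstEv : List Int) (ev : List Int) : List (List Int) :=
  let s1 := ev.foldl pvBuildStep ⟨[], [], [], [], [], [], [], [], 0, 1⟩  -- c = 0, f = 1
  let s2 := lstEv.foldl pvAssignStep s1
  if lstEv.length = 1 then
    [s2.n0, s2.n1, s2.n4, s2.n5]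
  else if lstEv.length = 2 then
    [s2.n0, s2.n1, s2.n2, s2.n3, s2.n4, s2.n5, s2.n6, s2.n7]
  else []  -- Python A returns None here (no list value); excluded by Pre_possEvid

-- ===== PORT B =====
def possEvid_alt (lstEv : List Int) (ev : List Int) : List (List Int) :=
  let base1 := ev.map (fun x => if x = -1 then 1 else x)
  let base0 := ev.map (fun x => if x = -1 then 0 else x)
  if lstEv.length = 1 ∨ lstEv.length = 2 then
    let combos : List (List Int) :=
      if lstEv.length = 1 then [[0], [1]] else [[0, 0], [1, 1], [0, 1], [1, 0]]
    [base1, base0].flatMap (fun base =>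
      combos.map (fun combo =>
        (List.range lstEv.length).foldl
          (fun cur j => PySem.List.pySetD cur (lstEv.getD j 0) (combo.getD j 0)) base))
  else []  -- Python B returns None here; excluded by Pre_possEvid

-- ===== PRECONDITION & SPEC =====
-- Pre_ excludes inputs where A raises IndexError (an index of lstEv outside [-len(ev), len(ev)))
-- and inputs with len(lstEv) ∉ {1,2}, on which A returns None — not a value of the declared list type.
def Pre_possEvid (lstEv : List Int) (ev : List Int) : Prop :=
  (lstEv.length = 1 ∨ lstEv.length = 2) ∧
  ∀ i ∈ lstEv, -(ev.length : Int) ≤ i ∧ i < (ev.length : Int)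
instance (lstEv : List Int) (ev : List Int) : Decidable (Pre_possEvid lstEv ev) := by
  unfold Pre_possEvid; infer_instance

def pvWitness_possEvid : List Int × List Int := ([0], [-1, 1])

def Spec_possEvid (lstEv : List Int) (ev : List Int) (out : List (List Int)) : Prop := out = possEvid_alt lstEv ev
instance (lstEv : List Int) (ev : List Int) (out : List (List Int)) : Decidable (Spec_possEvid lstEv ev out) := by unfold Spec_possEvid; infer_instance

-- ===== CLAIM (what is proved, stated in full; the proofs are below) =====
def Claim_equal_possEvid : Prop := ∀ (lstEv : List Int) (ev : List Int), Dom_possEvid lstEv ev → Pre_possEvid lstEv ev → Spec_possEvid lstEv ev (possEvid lstEv ev)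

-- ===== LEMMAS AND PROOFS =====
-- A's first loop builds base1 in n0..n3 and base0 in n4..n7, leaving c, f untouched
theorem pvBuild_eq (ev : List Int) (s : PvASt) :
    ev.foldl pvBuildStep s =
      ⟨s.n0 ++ ev.map (fun x => if x = -1 then 1 else x),
       s.n1 ++ ev.map (fun x => if x = -1 then 1 else x),
       s.n2 ++ ev.map (fun x => if x = -1 then 1 else x),
       s.n3 ++ ev.map (fun x => if x = -1 then 1 else x),
       s.n4 ++ ev.map (fun x => if x = -1 then 0 else x),
       s.n5 ++ ev.map (fun x => if x = -1 then 0 else x),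
       s.n6 ++ ev.map (fun x => if x = -1 then 0 else x),
       s.n7 ++ ev.map (fun x => if x = -1 then 0 else x),
       s.c, s.f⟩ := by
  induction ev generalizing s with
  | nil => simp
  | cons x xs ih =>
    simp only [List.foldl_cons, List.map_cons, ih, pvBuildStep]
    split <;> simp

-- ===== VERDICT (by name: the statement is the Claim_ definition above) =====
theorem possEvid_spec : Claim_equal_possEvid := by
  intro lstEv ev _ hpre
  obtain ⟨hlen, _⟩ := hpre
  unfold Spec_possEvid possEvid possEvid_alt
  rcases lstEv with _ | ⟨i, _ | ⟨j, _ | ⟨k, rest⟩⟩⟩ <;> simp_all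
  · -- lstEv = [i]
    simp [pvBuild_eq, pvAssignStep]
  · -- lstEv = [i, j]
    simp [List.foldl, pvBuild_eq, pvAssignStep, List.range_succ]
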